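-- pv_equiv track=rewrite | github.com/rpycgo/Algorithm | BOJ/Python/Binary Search/7469.py | get_count
-- ===== SOURCE A (Python) =====
-- from bisect import bisect_right
--
-- def get_count(node, start, end, i, j, val, tree):
--     if j < start or end < i:
--         return 0
--     if i <= start and end <= j:
--         return bisect_right(tree[node], val)
--
--     mid = (start + end) // 2
--
--     return get_count(node*2, start, mid, i, j, val, tree) + \
--            get_count(node*2+1, mid+1, end, i, j, val, tree)
-- ===== SOURCE B (Python) =====
-- from bisect import bisect_right
--
-- def get_count(node, start, end, i, j, val, tree):
--     total = 0
--     stack = [(node, start, end)]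
--     while stack:
--         n, s, e = stack.pop()
--         if j < s or e < i:
--             continue
--         if i <= s and e <= j:
--             total += bisect_right(tree[n], val)
--             continue
--         mid = (s + e) // 2
--         stack.append((n * 2, s, mid))
--         stack.append((n * 2 + 1, mid + 1, e))
--     return total
-- ===== Notes on version B (the rewrite author's own statement) =====
-- stated objective: alternative
-- what changed: The recursive segment-tree descent is replaced by an iterative while-loop over an explicit stack of (node, start, end) frames with a running accumulator; same skip/cover/split conditions and bisect_right, but an explicit worklist instead of recursion.
-- outside the precondition, e.g. on get_count(1, 0, 1, 0, 0, 5, {2: [1, 2]}): A returns 2, B returns 2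
import Mathlib
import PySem

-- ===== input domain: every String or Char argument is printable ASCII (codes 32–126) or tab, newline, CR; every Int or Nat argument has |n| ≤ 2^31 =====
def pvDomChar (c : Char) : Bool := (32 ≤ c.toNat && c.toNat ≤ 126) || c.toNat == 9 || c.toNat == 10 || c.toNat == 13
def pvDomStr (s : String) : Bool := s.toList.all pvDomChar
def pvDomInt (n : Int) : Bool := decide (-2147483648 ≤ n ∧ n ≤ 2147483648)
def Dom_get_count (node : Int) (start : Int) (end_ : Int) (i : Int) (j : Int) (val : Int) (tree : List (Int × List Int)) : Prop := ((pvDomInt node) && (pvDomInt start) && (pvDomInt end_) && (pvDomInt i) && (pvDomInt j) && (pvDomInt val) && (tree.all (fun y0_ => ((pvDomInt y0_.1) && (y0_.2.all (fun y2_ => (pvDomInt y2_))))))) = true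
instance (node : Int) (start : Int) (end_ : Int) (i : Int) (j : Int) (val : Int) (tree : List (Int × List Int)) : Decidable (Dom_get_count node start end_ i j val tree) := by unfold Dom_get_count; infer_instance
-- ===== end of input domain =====

-- ===== PORT A =====
-- Header: B replaces A's recursive descent by an iterative explicit-stack traversal with an
-- accumulator (same conditions, same bisect_right); equivalence is about the return value.

-- bisect.bisect_right, transliterated (binary-search insertion point); shared helper of both ports.
-- fuel only makes the loop total; hi - lo + 1 steps always suffice (the interval shrinks each step)
def bisectGo (a : List Int) (val : Int) (fuel : Nat) (lo hi : Nat) : Nat :=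
  match fuel with
  | 0 => lo
  | fuel + 1 =>
    if lo < hi then
      let mid := (lo + hi) / 2
      if val < a.getD mid 0 then bisectGo a val fuel lo mid else bisectGo a val fuel (mid + 1) hi
    else lo

def pyBisectRight (a : List Int) (val : Int) : Int := (bisectGo a val (a.length + 1) 0 a.length : Nat)

-- tree[node]: dict lookup; the [] default is only reached where Python raises KeyError (outside Pre_)
def treeGet (tree : List (Int × List Int)) (n : Int) : List Int :=
  ((PySem.Dict.mk tree).get? n).getD []

-- A's recursion; fuel only makes it total: (end - start).toNat + 1 always suffices, since the
-- function only recurses when start < end and both child intervals are strictly shorter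
def gcAux (fuel : Nat) (node : Int) (start : Int) (end_ : Int) (i : Int) (j : Int) (val : Int) (tree : List (Int × List Int)) : Int :=
  match fuel with
  | 0 => 0
  | fuel + 1 =>
    if j < start ∨ end_ < i then 0
    else if i ≤ start ∧ end_ ≤ j then pyBisectRight (treeGet tree node) val
    else
      gcAux fuel (node * 2) start (PySem.Int.floordiv (start + end_) 2) i j val tree +
      gcAux fuel (node * 2 + 1) (PySem.Int.floordiv (start + end_) 2 + 1) end_ i j val tree

def get_count (node : Int) (start : Int) (end_ : Int) (i : Int) (j : Int) (val : Int) (tree : List (Int × List Int)) : Int :=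
  gcAux ((end_ - start).toNat + 1) node start end_ i j val tree

-- ===== PORT B =====
-- the while-loop of Source B: stack head = Python stack top (last element); pop, apply the three cases.
-- fuel only makes the while-loop total: 2*(end - start).toNat + 2 iterations always suffice
def alAux (fuel : Nat) (i : Int) (j : Int) (val : Int) (tree : List (Int × List Int)) (stack : List (Int × Int × Int)) (total : Int) : Int :=
  match fuel, stack with
  | 0, _ => total
  | _ + 1, [] => total
  | fuel + 1, (n, s, e) :: rest =>
    if j < s ∨ e < i then alAux fuel i j val tree rest total
    else if i ≤ s ∧ e ≤ j then alAux fuel i j val tree rest (total + pyBisectRight (treeGet tree n) val)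
    else
      alAux fuel i j val tree
        ((n * 2 + 1, PySem.Int.floordiv (s + e) 2 + 1, e) ::
         (n * 2, s, PySem.Int.floordiv (s + e) 2) :: rest) total

def get_count_alt (node : Int) (start : Int) (end_ : Int) (i : Int) (j : Int) (val : Int) (tree : List (Int × List Int)) : Int :=
  alAux (2 * (end_ - start).toNat + 2) i j val tree [(node, start, end_)] 0

-- ===== PRECONDITION & SPEC =====
-- pvSubtreeOK tree n L: the dict contains the complete binary subtree rooted at key n for an
-- interval of length L — the shape a merge-sort tree actually has. It depends only on the tree's
-- shape (never on the query i, j, val); left child holds ⌈L/2⌉ positions, right child ⌊L/2⌋.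
def pvSubtreeOK (tree : List (Int × List Int)) (n : Int) (L : Nat) : Bool :=
  if L ≤ 1 then ((PySem.Dict.mk tree).get? n).isSome
  else ((PySem.Dict.mk tree).get? n).isSome
       && pvSubtreeOK tree (n * 2) ((L + 1) / 2)
       && pvSubtreeOK tree (n * 2 + 1) (L / 2)
  termination_by L
  decreasing_by all_goals omega

-- Pre_ excludes the inputs on which Python A raises: KeyError when the descent reaches a tree node
-- whose key is missing from the dict, and RecursionError when start > end_ makes the split case
-- recurse forever. It admits skipped/empty queries, a single covered node whose key is present, and
-- every query against a complete merge-sort tree over [start, end_] (pvSubtreeOK — the shape the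
-- function is written for); partial trees whose missing nodes the query happens to avoid are
-- conservatively excluded too (A still returns there, see cites; B returns the same value).
def Pre_get_count (node : Int) (start : Int) (end_ : Int) (i : Int) (j : Int) (val : Int) (tree : List (Int × List Int)) : Prop :=
  (j < start ∨ end_ < i) ∨
  (i ≤ start ∧ end_ ≤ j ∧ (((PySem.Dict.mk tree).get? node).isSome = true)) ∨
  (start ≤ end_ ∧ j < i) ∨
  (start ≤ end_ ∧ pvSubtreeOK tree node (end_ - start + 1).toNat = true)
instance (node : Int) (start : Int) (end_ : Int) (i : Int) (j : Int) (val : Int) (tree : List (Int × List Int)) : Decidable (Pre_get_count node start end_ i j val tree) := by unfold Pre_get_count; infer_instance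

def pvWitness_get_count : Int × Int × Int × Int × Int × Int × (List (Int × List Int)) :=
  (1, 0, 1, 0, 1, 5, [(1, [1, 2]), (2, [1]), (3, [2])])

def Spec_get_count (node : Int) (start : Int) (end_ : Int) (i : Int) (j : Int) (val : Int) (tree : List (Int × List Int)) (out : Int) : Prop := out = get_count_alt node start end_ i j val tree
instance (node : Int) (start : Int) (end_ : Int) (i : Int) (j : Int) (val : Int) (tree : List (Int × List Int)) (out : Int) : Decidable (Spec_get_count node start end_ i j val tree out) := by unfold Spec_get_count; infer_instance

-- ===== CLAIM (what is proved, stated in full; the proofs are below) =====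
def Claim_equal_get_count : Prop := ∀ (node : Int) (start : Int) (end_ : Int) (i : Int) (j : Int) (val : Int) (tree : List (Int × List Int)), Dom_get_count node start end_ i j val tree → Pre_get_count node start end_ i j val tree → Spec_get_count node start end_ i j val tree (get_count node start end_ i j val tree)

-- ===== LEMMAS AND PROOFS =====
theorem mid_facts (s e : Int) (hse : s < e) :
    s ≤ PySem.Int.floordiv (s + e) 2 ∧ PySem.Int.floordiv (s + e) 2 < e := by
  rw [PySem.Int.floordiv_eq_ediv_of_pos (by norm_num : (0:Int) < 2)]
  omega

-- any two sufficient fuels give the same value of A's recursion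
theorem gcAux_eq (f1 : Nat) : ∀ (f2 : Nat) (node s e i j val : Int) (tree : List (Int × List Int)),
    (e - s).toNat < f1 → (e - s).toNat < f2 →
    gcAux f1 node s e i j val tree = gcAux f2 node s e i j val tree := by
  induction f1 with
  | zero => intro f2 node s e i j val tree h1 _; exact absurd h1 (Nat.not_lt_zero _)
  | succ f ih =>
    intro f2 node s e i j val tree h1 h2
    cases f2 with
    | zero => exact absurd h2 (Nat.not_lt_zero _)
    | succ f2 =>
      simp only [gcAux]
      split_ifs with hc1 hc2
      · rfl
      · rfl
      · have hse : s < e := by omega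
        have hm := mid_facts s e hse
        generalize hmv : PySem.Int.floordiv (s + e) 2 = m at hm ⊢
        rw [ih f2 (node * 2) s m i j val tree (by omega) (by omega),
            ih f2 (node * 2 + 1) (m + 1) e i j val tree (by omega) (by omega)]

theorem gc_skip (n s e i j val : Int) (tree : List (Int × List Int)) (h1 : j < s ∨ e < i) :
    get_count n s e i j val tree = 0 := by
  simp only [get_count, gcAux]
  rw [if_pos h1]

theorem gc_cover (n s e i j val : Int) (tree : List (Int × List Int))
    (h1 : ¬(j < s ∨ e < i)) (h2 : i ≤ s ∧ e ≤ j) :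
    get_count n s e i j val tree = pyBisectRight (treeGet tree n) val := by
  simp only [get_count, gcAux]
  rw [if_neg h1, if_pos h2]

theorem gc_split (n s e i j val : Int) (tree : List (Int × List Int))
    (h1 : ¬(j < s ∨ e < i)) (h2 : ¬(i ≤ s ∧ e ≤ j)) :
    get_count n s e i j val tree =
      get_count (n * 2) s (PySem.Int.floordiv (s + e) 2) i j val tree +
      get_count (n * 2 + 1) (PySem.Int.floordiv (s + e) 2 + 1) e i j val tree := by
  have hse : s < e := by omega
  have hm := mid_facts s e hse
  simp only [get_count]
  conv_lhs => rw [gcAux]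
  rw [if_neg h1, if_neg h2]
  generalize hmv : PySem.Int.floordiv (s + e) 2 = m at hm ⊢
  rw [gcAux_eq ((e - s).toNat) ((m - s).toNat + 1) (n * 2) s m i j val tree (by omega) (by omega),
      gcAux_eq ((e - s).toNat) ((e - (m + 1)).toNat + 1) (n * 2 + 1) (m + 1) e i j val tree (by omega) (by omega)]

-- the loop invariant: with sufficient fuel, B's loop adds A's answer for every pending frame
theorem alAux_eq (i j val : Int) (tree : List (Int × List Int)) (fuel : Nat) :
    ∀ (stack : List (Int × Int × Int)) (total : Int),
      (stack.map (fun f => 2 * (f.2.2 - f.2.1).toNat + 1)).sum < fuel →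
      alAux fuel i j val tree stack total =
        total + (stack.map (fun f => get_count f.1 f.2.1 f.2.2 i j val tree)).sum := by
  induction fuel with
  | zero => intro stack total h; exact absurd h (Nat.not_lt_zero _)
  | succ f ih =>
    intro stack total h
    cases stack with
    | nil => simp [alAux]
    | cons hd rest =>
      obtain ⟨n, s, e⟩ := hd
      simp only [List.map_cons, List.sum_cons] at h ⊢
      simp only [alAux]
      split_ifs with hc1 hc2
      · rw [ih rest total (by omega), gc_skip n s e i j val tree hc1]
        ring
      · rw [ih rest (total + pyBisectRight (treeGet tree n) val) (by omega),
            gc_cover n s e i j val tree hc1 hc2]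
        ring
      · have hse : s < e := by omega
        have hm := mid_facts s e hse
        rw [gc_split n s e i j val tree hc1 hc2]
        generalize hmv : PySem.Int.floordiv (s + e) 2 = m at hm ⊢
        rw [ih ((n * 2 + 1, m + 1, e) :: (n * 2, s, m) :: rest) total (by simp only [List.map_cons, List.sum_cons]; omega)]
        simp only [List.map_cons, List.sum_cons]
        ring

-- ===== VERDICT (by name: the statement is the Claim_ definition above) =====
theorem get_count_spec : Claim_equal_get_count := by
  intro node start end_ i j val tree _ _
  unfold Spec_get_count get_count_alt
  rw [alAux_eq i j val tree _ [(node, start, end_)] 0 (by simp only [List.map_cons, List.sum_cons, List.map_nil, List.sum_nil]; omega)]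
  simp
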